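-- pv_equiv track=rewrite | github.com/pycyba/python-alx-by-cyba | MOJE/dzien9_moj/inne_jezyki/mnozenie1.py | mnoz_zakres
-- ===== SOURCE A (Python) =====
-- def mnoz_zakres(n):
--     t1 = list(range(n))
--     t2 = list(range(n))
--     suma = 0
--     for e1 in t1:
--         for e2 in t2:
--             suma += e1 * e2
--     return suma
-- ===== SOURCE B (Python) =====
-- def mnoz_zakres(n):
--     m = n if n > 0 else 0
--     s = m * (m - 1) // 2
--     return s * s
-- ===== Notes on version B (the rewrite author's own statement) =====
-- stated objective: faster
-- what changed: Replaced the quadratic double loop with the closed-form Gauss sum squared, treating nonpositive n as the empty range.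
import Mathlib
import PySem

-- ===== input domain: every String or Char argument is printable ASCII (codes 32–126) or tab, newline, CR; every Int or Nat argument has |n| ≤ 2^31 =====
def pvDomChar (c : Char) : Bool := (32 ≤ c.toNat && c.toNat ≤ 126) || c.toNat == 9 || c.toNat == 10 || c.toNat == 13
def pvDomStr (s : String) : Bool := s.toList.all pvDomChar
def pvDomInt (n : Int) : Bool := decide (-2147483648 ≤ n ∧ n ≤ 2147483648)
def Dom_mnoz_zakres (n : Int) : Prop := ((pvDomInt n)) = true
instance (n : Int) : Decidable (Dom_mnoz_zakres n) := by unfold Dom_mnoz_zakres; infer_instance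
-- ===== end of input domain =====

-- B replaces A's quadratic double loop with the closed form (n(n-1)/2)^2 — faster (O(1) vs O(n^2)).

-- ===== PORT A =====
def mnoz_zakres (n : Int) : Int :=
  let t1 := PySem.List.pyRange 0 n 1
  let t2 := PySem.List.pyRange 0 n 1
  t1.foldl (fun suma e1 => t2.foldl (fun s e2 => s + e1 * e2) suma) 0

-- ===== PORT B =====
def mnoz_zakres_alt (n : Int) : Int :=
  let m := if n > 0 then n else 0
  let s := PySem.Int.floordiv (m * (m - 1)) 2
  s * s

-- ===== PRECONDITION & SPEC =====
def Spec_mnoz_zakres (n : Int) (out : Int) : Prop := out = mnoz_zakres_alt n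
instance (n : Int) (out : Int) : Decidable (Spec_mnoz_zakres n out) := by unfold Spec_mnoz_zakres; infer_instance

-- ===== CLAIM (what is proved, stated in full; the proofs are below) =====
def Claim_equal_mnoz_zakres : Prop := ∀ (n : Int), Dom_mnoz_zakres n → Spec_mnoz_zakres n (mnoz_zakres n)

-- ===== LEMMAS AND PROOFS =====

-- inner loop adds e1 * (sum of t)
theorem pv_inner_foldl (e1 : Int) (t : List Int) (acc : Int) :
    t.foldl (fun s e2 => s + e1 * e2) acc = acc + e1 * t.sum := by
  induction t generalizing acc with
  | nil => simp
  | cons x xs ih => simp [List.foldl, ih, List.sum_cons]; ring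

-- outer loop multiplies by sum of t1
theorem pv_outer_foldl (t1 t2 : List Int) (acc : Int) :
    t1.foldl (fun suma e1 => t2.foldl (fun s e2 => s + e1 * e2) suma) acc
      = acc + t1.sum * t2.sum := by
  induction t1 generalizing acc with
  | nil => simp
  | cons x xs ih =>
    simp only [List.foldl_cons]
    rw [pv_inner_foldl, ih, List.sum_cons]
    ring

theorem pv_two_mul_sum_range_nat (k : Nat) :
    2 * (PySem.List.pyRange 0 (k : Int) 1).sum = (k : Int) * ((k : Int) - 1) := by
  induction k with
  | zero => simp [PySem.List.pyRange_one_eq_nil]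
  | succ m ih =>
    have h : PySem.List.pyRange 0 ((m : Int) + 1) 1
        = PySem.List.pyRange 0 (m : Int) 1 ++ [(m : Int)] :=
      PySem.List.pyRange_one_succ_right (by exact_mod_cast Nat.zero_le m)
    push_cast
    rw [h, List.sum_append]
    simp only [List.sum_cons, List.sum_nil]
    push_cast at ih
    linarith

theorem pv_two_mul_sum_range (n : Int) :
    2 * (PySem.List.pyRange 0 n 1).sum = (if n > 0 then n else 0) * ((if n > 0 then n else 0) - 1) := by
  split_ifs with h
  · have := pv_two_mul_sum_range_nat n.toNat
    rwa [Int.toNat_of_nonneg (le_of_lt h)] at this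
  · rw [PySem.List.pyRange_one_eq_nil (by omega)]
    simp

-- ===== VERDICT (by name: the statement is the Claim_ definition above) =====
theorem mnoz_zakres_spec : Claim_equal_mnoz_zakres := by
  intro n _
  show mnoz_zakres n = mnoz_zakres_alt n
  unfold mnoz_zakres mnoz_zakres_alt
  simp only []
  rw [pv_outer_foldl]
  set m : Int := if n > 0 then n else 0 with hm
  have hs := pv_two_mul_sum_range n
  rw [← hm] at hs
  have : PySem.Int.floordiv (m * (m - 1)) 2 = (PySem.List.pyRange 0 n 1).sum := by
    rw [← hs]
    show Int.fdiv _ _ = _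
    rw [Int.mul_fdiv_cancel_left _ (by norm_num)]
  rw [this]
  ring
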